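-- pv_equiv track=rewrite | github.com/S-G08/DSA-with-Pyhton | Skill Test 1/minAndMaxCostToBuyNCandies.py | maximumCost
-- ===== SOURCE A (Python) =====
-- def maximumCost(cost, n, k):
--     res = 0
--     index = 0
--     i = n-1
--     while(i >= index):
--         res += cost[i]
--         index += k
--         i -= 1
--     return res
-- ===== SOURCE B (Python) =====
-- def maximumCost(cost, n, k):
--     if n < 1:
--         return 0
--     m = (n - 1) // (k + 1) + 1
--     return sum(cost[n - m:n])
-- ===== Notes on version B (the rewrite author's own statement) =====
-- stated objective: simpler
-- what changed: Replaces the advance-and-compare while loop by a closed-form iteration count m = (n-1)//(k+1)+1 and a single slice sum of the last m of the first n costs.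
import Mathlib
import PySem

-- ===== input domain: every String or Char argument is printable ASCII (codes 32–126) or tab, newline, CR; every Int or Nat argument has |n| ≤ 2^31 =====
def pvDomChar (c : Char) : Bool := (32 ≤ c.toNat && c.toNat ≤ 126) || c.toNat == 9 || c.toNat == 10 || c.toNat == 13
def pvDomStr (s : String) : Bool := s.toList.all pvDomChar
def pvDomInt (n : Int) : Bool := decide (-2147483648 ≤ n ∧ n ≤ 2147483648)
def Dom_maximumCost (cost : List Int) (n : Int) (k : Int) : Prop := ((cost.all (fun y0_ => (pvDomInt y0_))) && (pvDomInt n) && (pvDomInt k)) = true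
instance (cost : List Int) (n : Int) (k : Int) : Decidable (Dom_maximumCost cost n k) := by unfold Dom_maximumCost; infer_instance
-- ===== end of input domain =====

-- B replaces A's advance-and-compare while loop by a closed-form iteration count and one slice sum (simpler decomposition, same cost).


-- ===== PORT A =====
-- while(i >= index): res += cost[i]; index += k; i -= 1   — transcribed with fuel as a pure
-- totality guard (cost.length + 1 exceeds the iteration count on every input Pre_ admits).
def maximumCostLoop (cost : List Int) (k : Int) : Nat → Int → Int → Int → Int
  | 0, res, _, _ => res
  | fuel + 1, res, index, i =>
    if index ≤ i then
      maximumCostLoop cost k fuel (res + PySem.List.pyGetD cost i 0) (index + k) (i - 1)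
    else res

def maximumCost (cost : List Int) (n : Int) (k : Int) : Int :=
  maximumCostLoop cost k (cost.length + 1) 0 0 (n - 1)

-- ===== PORT B =====
def maximumCost_alt (cost : List Int) (n : Int) (k : Int) : Int :=
  if n < 1 then 0
  else
    let m := PySem.Int.floordiv (n - 1) (k + 1) + 1
    (PySem.List.slice cost (some (n - m)) (some n)).sum

-- ===== PRECONDITION & SPEC =====
-- Pre_ excludes exactly the inputs where A raises IndexError or loops into an IndexError:
-- n > len(cost) (first access out of range) or k < 0 with n ≥ 1 (the gap never closes).
def Pre_maximumCost (cost : List Int) (n : Int) (k : Int) : Prop :=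
  n < 1 ∨ (0 ≤ k ∧ n ≤ cost.length)
instance (cost : List Int) (n : Int) (k : Int) : Decidable (Pre_maximumCost cost n k) := by
  unfold Pre_maximumCost; infer_instance

def pvWitness_maximumCost : List Int × Int × Int := ([1, 2, 3, 4], 4, 1)

def Spec_maximumCost (cost : List Int) (n : Int) (k : Int) (out : Int) : Prop := out = maximumCost_alt cost n k
instance (cost : List Int) (n : Int) (k : Int) (out : Int) : Decidable (Spec_maximumCost cost n k out) := by unfold Spec_maximumCost; infer_instance

-- ===== CLAIM (what is proved, stated in full; the proofs are below) =====
def Claim_equal_maximumCost : Prop := ∀ (cost : List Int) (n : Int) (k : Int), Dom_maximumCost cost n k → Pre_maximumCost cost n k → Spec_maximumCost cost n k (maximumCost cost n k)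

-- ===== LEMMAS AND PROOFS =====

-- sum of cost[a:b] for integer bounds, drop/take form used by the loop invariant
def sumSeg (cost : List Int) (a b : Int) : Int :=
  ((cost.drop a.toNat).take (b - a).toNat).sum

-- number of loop iterations remaining from state (index, i)
def steps (k index i : Int) : Int :=
  if i < index then 0 else (i - index) / (k + 1) + 1

lemma steps_nonneg (k index i : Int) (hk : 0 ≤ k) : 0 ≤ steps k index i := by
  unfold steps
  split_ifs with h
  · exact le_refl 0
  · have : 0 ≤ (i - index) / (k + 1) := Int.ediv_nonneg (by omega) (by omega)
    omega

lemma steps_le_gap (k index i : Int) (_hk : 0 ≤ k) (h : index ≤ i) :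
    steps k index i ≤ i - index + 1 := by
  unfold steps
  rw [if_neg (by omega)]
  have : (i - index) / (k + 1) ≤ i - index := Int.ediv_le_self _ (by omega)
  omega

lemma steps_succ (k index i : Int) (hk : 0 ≤ k) (h : index ≤ i) :
    steps k index i = steps k (index + k) (i - 1) + 1 := by
  unfold steps
  rw [if_neg (by omega)]
  by_cases h2 : i - 1 < index + k
  · rw [if_pos h2]
    have h3 : (i - index) / (k + 1) = 0 :=
      Int.ediv_eq_zero_of_lt (by omega) (by omega)
    omega
  · rw [if_neg h2]
    have : (i - 1 - (index + k)) = (i - index) + (-1) * (k + 1) := by ring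
    rw [this, Int.add_mul_ediv_right _ _ (by omega : (k : Int) + 1 ≠ 0)]
    ring

lemma sumSeg_empty (cost : List Int) (a b : Int) (h : b ≤ a) : sumSeg cost a b = 0 := by
  unfold sumSeg
  have : (b - a).toNat = 0 := by omega
  simp [this]

lemma sumSeg_succ (cost : List Int) (a i : Int) (h0 : 0 ≤ a) (hai : a ≤ i)
    (hil : i < cost.length) :
    sumSeg cost a (i + 1) = sumSeg cost a i + cost.getD i.toNat 0 := by
  unfold sumSeg
  have h1 : (i + 1 - a).toNat = (i - a).toNat + 1 := by omega
  rw [h1, List.take_add_one, List.sum_append]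
  have hlt : (i - a).toNat < (cost.drop a.toNat).length := by
    rw [List.length_drop]; omega
  have : (cost.drop a.toNat)[(i - a).toNat]? = some (cost.getD i.toNat 0) := by
    rw [List.getElem?_drop]
    have h2 : a.toNat + (i - a).toNat = i.toNat := by omega
    rw [h2, List.getElem?_eq_getElem (by omega), List.getD_eq_getElem _ _ (by omega)]
  simp [this]

lemma loop_eq (cost : List Int) (k : Int) (hk : 0 ≤ k) :
    ∀ (fuel : Nat) (res index i : Int), 0 ≤ index → i < cost.length →
      steps k index i ≤ (fuel : Int) →
      maximumCostLoop cost k fuel res index i =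
        res + sumSeg cost (i + 1 - steps k index i) (i + 1) := by
  intro fuel
  induction fuel with
  | zero =>
    intro res index i h0 hi hf
    have hs : steps k index i = 0 := le_antisymm (by exact_mod_cast hf) (steps_nonneg k index i hk)
    rw [hs, sumSeg_empty cost _ _ (by omega)]
    simp [maximumCostLoop]
  | succ fuel ih =>
    intro res index i h0 hi hf
    unfold maximumCostLoop
    by_cases hc : index ≤ i
    · rw [if_pos hc]
      have hsucc := steps_succ k index i hk hc
      have hii : (0 : Int) ≤ i := by omega
      have hf' : steps k index i ≤ (fuel : Int) + 1 := by push_cast at hf; omega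
      have hle : steps k (index + k) (i - 1) ≤ (fuel : Int) := by omega
      have ih' := ih (res + PySem.List.pyGetD cost i 0) (index + k) (i - 1)
        (by omega) (by omega) hle
      rw [ih']
      have hlow : 0 ≤ i + 1 - steps k index i := by
        have := steps_le_gap k index i hk hc; omega
      have hai : i + 1 - steps k index i ≤ i := by
        have h1 := steps_nonneg k (index + k) (i - 1) hk
        omega
      have hsum := sumSeg_succ cost (i + 1 - steps k index i) i hlow hai hi
      have hget : PySem.List.pyGetD cost i 0 = cost.getD i.toNat 0 := by
        conv_lhs => rw [show i = ((i.toNat : Nat) : Int) from by omega]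
        rw [PySem.List.pyGetD_natCast]
      have harg : i - 1 + 1 - steps k (index + k) (i - 1) = i + 1 - steps k index i := by omega
      have harg2 : i - 1 + 1 = i := by ring
      rw [hget, harg, harg2, hsum]
      ring
    · rw [if_neg hc]
      have hs : steps k index i = 0 := by unfold steps; rw [if_pos (by omega)]
      rw [hs]
      rw [sumSeg_empty cost _ _ (by omega)]
      ring

-- ===== VERDICT (by name: the statement is the Claim_ definition above) =====
theorem maximumCost_spec : Claim_equal_maximumCost := by
  intro cost n k _hdom hpre
  unfold Spec_maximumCost maximumCost
  by_cases hn : n < 1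
  · unfold maximumCost_alt
    rw [if_pos hn]
    unfold maximumCostLoop
    rw [if_neg (by omega)]
  · rcases hpre with hlt | ⟨hk, hlen⟩
    · omega
    have hlen' : n ≤ (cost.length : Int) := hlen
    have halt : maximumCost_alt cost n k =
        (PySem.List.slice cost (some (n - (PySem.Int.floordiv (n - 1) (k + 1) + 1))) (some n)).sum := by
      simp only [maximumCost_alt, if_neg hn]
    have hm : PySem.Int.floordiv (n - 1) (k + 1) + 1 = steps k 0 (n - 1) := by
      unfold steps
      rw [if_neg (by omega), PySem.Int.floordiv_eq_ediv_of_pos (by omega)]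
      simp
    have hloop := loop_eq cost k hk (cost.length + 1) 0 0 (n - 1) (le_refl 0)
      (by omega)
      (by
        have h1 := steps_le_gap k 0 (n - 1) hk (by omega)
        push_cast
        omega)
    rw [hloop, halt, hm]
    set m := steps k 0 (n - 1) with hmdef
    have hm1 : 1 ≤ m := by
      unfold steps at hmdef
      rw [if_neg (by omega)] at hmdef
      have : 0 ≤ (n - 1 - 0) / (k + 1) := Int.ediv_nonneg (by omega) (by omega)
      omega
    have hmn : m ≤ n := by
      have := steps_le_gap k 0 (n - 1) hk (by omega); omega
    have harg : n - 1 + 1 - m = n - m := by ring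
    have harg2 : n - 1 + 1 = n := by ring
    rw [harg, harg2]
    obtain ⟨a, ha⟩ : ∃ a : Nat, n - m = (a : Int) := ⟨(n - m).toNat, by omega⟩
    obtain ⟨b, hb⟩ : ∃ b : Nat, n = (b : Int) := ⟨n.toNat, by omega⟩
    rw [ha, hb, PySem.List.slice_natCast]
    unfold sumSeg
    rw [Int.toNat_natCast, show ((b : Int) - (a : Int)).toNat = b - a by omega]
    ring
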